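-- pv_equiv track=rewrite | github.com/Ujjwal-Ruhal/100DaysOfPythonProblems | day-19/F10_digit_analysis.py | digit_analysis
-- ===== SOURCE A (Python) =====
-- def digit_analysis(n):
--     n = abs(n)
--     total_sum, total_product, digit_count = 0 , 1 , 0
--
--     while n > 0:
--         digit = n % 10
--         total_sum += digit
--         total_product *= digit
--         digit_count += 1
--         n //= 10
--
--     return total_sum, total_product, digit_count
-- ===== SOURCE B (Python) =====
-- def _width(n):
--     # number of decimal digits of n >= 1, by recursion
--     return 1 if n < 10 else 1 + _width(n // 10)
--
-- def _agg(n, w):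
--     # (digit sum, digit product) of n viewed as exactly w decimal digits
--     # (leading zeros included), by divide and conquer on the width
--     if w == 1:
--         return n, n
--     half = w // 2
--     q, r = divmod(n, 10 ** half)
--     s1, p1 = _agg(q, w - half)
--     s2, p2 = _agg(r, half)
--     return s1 + s2, p1 * p2
--
-- def digit_analysis(n):
--     n = abs(n)
--     if n == 0:
--         return 0, 1, 0
--     w = _width(n)
--     s, p = _agg(n, w)
--     return s, p, w
-- ===== Notes on version B (the rewrite author's own statement) =====
-- stated objective: alternative
-- what changed: B replaces A's single accumulate-while-dividing loop by a divide-and-conquer on the digit width: it computes the width recursively, splits the number by divmod(n, 10**half) into high and low halves, recursively aggregates each half's digit sum and product, and combines them; leading zeros of the low half are kept via the fixed width.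
import Mathlib
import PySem

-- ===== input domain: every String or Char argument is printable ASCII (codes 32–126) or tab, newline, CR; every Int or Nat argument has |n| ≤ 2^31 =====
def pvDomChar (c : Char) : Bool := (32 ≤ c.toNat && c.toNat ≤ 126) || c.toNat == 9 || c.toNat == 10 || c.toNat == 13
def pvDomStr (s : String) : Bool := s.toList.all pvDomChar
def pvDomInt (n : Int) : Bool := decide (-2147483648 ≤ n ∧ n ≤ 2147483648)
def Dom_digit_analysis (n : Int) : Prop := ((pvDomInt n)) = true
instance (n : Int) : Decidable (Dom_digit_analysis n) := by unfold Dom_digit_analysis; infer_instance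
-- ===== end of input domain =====

-- B computes the same (digit sum, digit product, digit count) by divide-and-conquer on the
-- digit width (splitting the number with divmod by a power of 10) instead of A's single
-- accumulator loop; same asymptotic cost, genuinely different algorithm.


-- ===== PORT A =====
-- the while loop of A, over the nonnegative |n| (tracked as a Nat so Python's % and // agree)
def pvLoopA (n : Nat) (totalSum totalProduct digitCount : Int) : Int × Int × Int :=
  if n > 0 then
    pvLoopA (n / 10) (totalSum + (n % 10 : Nat)) (totalProduct * (n % 10 : Nat)) (digitCount + 1)
  else (totalSum, totalProduct, digitCount)

def digit_analysis (n : Int) : Int × Int × Int :=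
  pvLoopA n.natAbs 0 1 0

-- ===== PORT B =====
-- B's _width: number of decimal digits of n ≥ 1, by recursion
def pvWidth (n : Nat) : Nat :=
  if n < 10 then 1 else 1 + pvWidth (n / 10)
decreasing_by exact Nat.div_lt_self (by omega) (by omega)

-- B's _agg: (digit sum, digit product) of n viewed as exactly w digits, divide and conquer
-- on the width (the w = 0 branch is a totality guard only; B never calls _agg with w = 0)
def pvAgg (n : Nat) (w : Nat) : Int × Int :=
  if w = 1 then ((n : Int), (n : Int))
  else if w = 0 then (0, 1)
  else
    let half := w / 2
    let q := n / 10 ^ half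
    let r := n % 10 ^ half
    let (s1, p1) := pvAgg q (w - half)
    let (s2, p2) := pvAgg r half
    (s1 + s2, p1 * p2)
termination_by w
decreasing_by all_goals omega

def digit_analysis_alt (n : Int) : Int × Int × Int :=
  let m := n.natAbs
  if m = 0 then (0, 1, 0)
  else
    let w := pvWidth m
    let (s, p) := pvAgg m w
    (s, p, (w : Int))

-- ===== PRECONDITION & SPEC =====
def Spec_digit_analysis (n : Int) (out : Int × Int × Int) : Prop := out = digit_analysis_alt n
instance (n : Int) (out : Int × Int × Int) : Decidable (Spec_digit_analysis n out) := by unfold Spec_digit_analysis; infer_instance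

-- ===== CLAIM (what is proved, stated in full; the proofs are below) =====
def Claim_equal_digit_analysis : Prop := ∀ (n : Int), Dom_digit_analysis n → Spec_digit_analysis n (digit_analysis n)

-- ===== LEMMAS AND PROOFS =====
-- digits of n, least significant first, padded with zeros to exactly w entries
def padDigits : Nat → Nat → List Int
  | _, 0 => []
  | n, w + 1 => ((n % 10 : Nat) : Int) :: padDigits (n / 10) w

-- A's digit list (proof helper used to characterise pvLoopA)
def pvDigits (n : Nat) : List Int :=
  if n > 0 then ((n % 10 : Nat) : Int) :: pvDigits (n / 10) else []

lemma pvLoopA_eq (n : Nat) : ∀ (s p c : Int),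
    pvLoopA n s p c = (s + (pvDigits n).sum, p * (pvDigits n).prod, c + (pvDigits n).length) := by
  induction n using Nat.strong_induction_on with
  | _ n ih =>
    intro s p c
    by_cases h : n > 0
    · rw [pvLoopA, pvDigits]
      simp only [h, if_true]
      rw [ih (n / 10) (Nat.div_lt_self h (by norm_num))]
      simp [List.sum_cons, List.prod_cons]
      refine ⟨by ring, by ring, by ring⟩
    · rw [pvLoopA, pvDigits]
      simp [h]

lemma padDigits_length (w : Nat) : ∀ n, (padDigits n w).length = w := by
  induction w with
  | zero => intro n; rfl
  | succ w ih => intro n; simp [padDigits, ih]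

lemma padDigits_split (a : Nat) : ∀ (b n : Nat),
    padDigits n (a + b) = padDigits (n % 10 ^ a) a ++ padDigits (n / 10 ^ a) b := by
  induction a with
  | zero => intro b n; simp [padDigits]
  | succ a ih =>
    intro b n
    have h1 : n % 10 ^ (a + 1) % 10 = n % 10 := by
      rw [Nat.mod_mod_of_dvd _ (dvd_pow_self 10 (Nat.succ_ne_zero a))]
    have h2 : n % 10 ^ (a + 1) / 10 = n / 10 % 10 ^ a := by
      rw [pow_succ, Nat.mod_mul_left_div_self]
    have h3 : n / 10 ^ (a + 1) = n / 10 / 10 ^ a := by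
      rw [pow_succ', Nat.div_div_eq_div_mul]
    have : a + 1 + b = (a + b) + 1 := by omega
    rw [this]
    show ((n % 10 : Nat) : Int) :: padDigits (n / 10) (a + b) = _
    rw [ih b (n / 10)]
    simp [padDigits, h1, h2, h3]

lemma pvAgg_eq (w : Nat) : ∀ n, 1 ≤ w → n < 10 ^ w →
    pvAgg n w = ((padDigits n w).sum, (padDigits n w).prod) := by
  induction w using Nat.strong_induction_on with
  | _ w ih =>
    intro n hw hn
    by_cases h1 : w = 1
    · subst h1
      rw [pvAgg]
      simp only [if_true]
      have : n % 10 = n := Nat.mod_eq_of_lt (by simpa using hn)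
      simp [padDigits, this]
    · have hw2 : 2 ≤ w := by omega
      rw [pvAgg]
      simp only [h1, if_false]
      have h0 : ¬ w = 0 := by omega
      simp only [h0, if_false]
      have hhalf1 : 1 ≤ w / 2 := by omega
      have hhalf2 : w / 2 < w := by omega
      have hrest1 : 1 ≤ w - w / 2 := by omega
      have hrest2 : w - w / 2 < w := by omega
      have hq : n / 10 ^ (w / 2) < 10 ^ (w - w / 2) := by
        rw [Nat.div_lt_iff_lt_mul (Nat.pow_pos (by norm_num)), ← pow_add]
        have : w - w / 2 + w / 2 = w := by omega
        rw [this]; exact hn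
      have hr : n % 10 ^ (w / 2) < 10 ^ (w / 2) :=
        Nat.mod_lt _ (Nat.pow_pos (by norm_num))
      rw [ih (w - w / 2) hrest2 _ hrest1 hq, ih (w / 2) hhalf2 _ hhalf1 hr]
      have hsplit : padDigits n w
          = padDigits (n % 10 ^ (w / 2)) (w / 2) ++ padDigits (n / 10 ^ (w / 2)) (w - w / 2) := by
        have h' := padDigits_split (w / 2) (w - w / 2) n
        rw [show w / 2 + (w - w / 2) = w from by omega] at h'
        exact h'
      rw [hsplit]
      simp [List.sum_append, List.prod_append]
      exact ⟨by ring, by ring⟩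

lemma padDigits_width (n : Nat) (hn : 0 < n) : padDigits n (pvWidth n) = pvDigits n := by
  induction n using Nat.strong_induction_on with
  | _ n ih =>
    by_cases h : n < 10
    · rw [pvWidth]
      simp only [h, if_true]
      rw [pvDigits]
      simp only [hn, if_true]
      rw [pvDigits]
      have : n / 10 = 0 := Nat.div_eq_of_lt h
      simp [padDigits, this]
    · rw [pvWidth]
      simp only [h, if_false]
      have : 1 + pvWidth (n / 10) = pvWidth (n / 10) + 1 := by omega
      rw [this]
      show ((n % 10 : Nat) : Int) :: padDigits (n / 10) (pvWidth (n / 10)) = _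
      rw [ih (n / 10) (Nat.div_lt_self (by omega) (by norm_num)) (by omega)]
      conv_rhs => rw [pvDigits]
      simp [hn]

lemma width_bound (n : Nat) : n < 10 ^ pvWidth n := by
  induction n using Nat.strong_induction_on with
  | _ n ih =>
    by_cases h : n < 10
    · rw [pvWidth]; simp only [h, if_true]; simpa using h
    · rw [pvWidth]
      simp only [h, if_false]
      have hd : n / 10 < n := Nat.div_lt_self (by omega) (by norm_num)
      have := ih (n / 10) hd
      have h10 : n < 10 * (n / 10 + 1) := by omega
      calc n < 10 * (n / 10 + 1) := h10
        _ ≤ 10 * 10 ^ pvWidth (n / 10) := by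
              have : n / 10 + 1 ≤ 10 ^ pvWidth (n / 10) := this
              exact Nat.mul_le_mul_left 10 this
        _ = 10 ^ (1 + pvWidth (n / 10)) := by rw [pow_add, pow_one]

-- ===== VERDICT (by name: the statement is the Claim_ definition above) =====
theorem digit_analysis_spec : Claim_equal_digit_analysis := by
  intro n _
  show digit_analysis n = digit_analysis_alt n
  by_cases h0 : n.natAbs = 0
  · simp only [digit_analysis, digit_analysis_alt, h0, if_true]
    rw [pvLoopA]
    simp
  · have hpos : 0 < n.natAbs := Nat.pos_of_ne_zero h0
    simp only [digit_analysis, digit_analysis_alt, h0, if_false]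
    rw [pvLoopA_eq, pvAgg_eq (pvWidth n.natAbs) n.natAbs
      (by rw [pvWidth]; split <;> omega) (width_bound n.natAbs)]
    rw [padDigits_width n.natAbs hpos]
    have hlen : (pvDigits n.natAbs).length = pvWidth n.natAbs := by
      rw [← padDigits_width n.natAbs hpos, padDigits_length]
    simp [hlen]
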